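-- pv_equiv track=rewrite | github.com/bd091226/Final_Project | moter_control.py | get_turn_action
-- ===== SOURCE A (Python) =====
-- DIRECTIONS = ['N', 'E', 'S', 'W']
--
-- DIR_VECTORS = {'N': (-1, 0), 'E': (0, 1), 'S': (1, 0), 'W': (0, -1)}
--
-- def get_turn_action(current_dir, target_vec):
--     dir_idx = DIRECTIONS.index(current_dir)
--     for i in range(4):
--         candidate_dir = DIRECTIONS[(dir_idx + i) % 4]
--         if DIR_VECTORS[candidate_dir] == target_vec:
--             if i == 0:
--                 return 'F', candidate_dir
--             elif i == 1:
--                 return 'R', candidate_dir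
--             elif i == 2:
--                 return 'U', candidate_dir
--             elif i == 3:
--                 return 'L', candidate_dir
--     return None, current_dir
-- ===== SOURCE B (Python) =====
-- DIRECTIONS = ['N', 'E', 'S', 'W']
--
-- DIR_VECTORS = {'N': (-1, 0), 'E': (0, 1), 'S': (1, 0), 'W': (0, -1)}
--
-- VEC_TO_DIR = {v: k for k, v in DIR_VECTORS.items()}
--
-- TURNS = ['F', 'R', 'U', 'L']
--
-- def get_turn_action(current_dir, target_vec):
--     dir_idx = DIRECTIONS.index(current_dir)
--     target_dir = VEC_TO_DIR.get(target_vec)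
--     if target_dir is None:
--         return None, current_dir
--     return TURNS[(DIRECTIONS.index(target_dir) - dir_idx) % 4], target_dir
-- ===== Notes on version B (the rewrite author's own statement) =====
-- stated objective: simpler
-- what changed: replaces A's 4-step scan around the compass (candidate per offset, chained i==0..3 branches) with a single reverse lookup VEC_TO_DIR plus the modular index difference into a turn table; Pre_ excludes only current_dir outside N/E/S/W, where both raise ValueError
import Mathlib
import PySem

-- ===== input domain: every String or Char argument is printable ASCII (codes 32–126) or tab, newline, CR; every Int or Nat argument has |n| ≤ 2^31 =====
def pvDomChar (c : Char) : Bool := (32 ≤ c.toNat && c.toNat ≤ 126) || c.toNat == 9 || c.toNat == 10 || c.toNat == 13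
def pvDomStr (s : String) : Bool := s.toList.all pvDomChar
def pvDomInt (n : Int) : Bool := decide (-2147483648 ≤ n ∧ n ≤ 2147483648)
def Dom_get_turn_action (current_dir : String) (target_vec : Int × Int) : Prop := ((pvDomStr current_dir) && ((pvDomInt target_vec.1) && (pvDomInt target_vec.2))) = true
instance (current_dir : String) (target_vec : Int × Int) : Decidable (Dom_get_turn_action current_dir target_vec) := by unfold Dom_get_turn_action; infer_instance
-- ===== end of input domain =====

-- B replaces A's 4-offset scan around the compass with one reverse vector→direction
-- lookup and a modular index difference into a turn table (objective: simpler).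


-- ===== PORT A =====
def pvDirections : List String := ["N", "E", "S", "W"]

def pvDirVectors : PySem.Dict String (Int × Int) :=
  PySem.Dict.ofList [("N", (-1, 0)), ("E", (0, 1)), ("S", (1, 0)), ("W", (0, -1))]

-- the 'for i in range(4)' loop of A, with its early returns
def pvLoopA (current_dir : String) (target_vec : Int × Int) (dirIdx : Int) :
    List Int → Option String × String
  | [] => (none, current_dir)
  | i :: rest =>
    match PySem.List.pyGet? pvDirections (PySem.Int.mod (dirIdx + i) 4) with
    | none => (none, current_dir)  -- unreachable: index is in [0,3]
    | some candidate_dir =>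
      if pvDirVectors.get? candidate_dir = some target_vec then
        if i = 0 then (some "F", candidate_dir)
        else if i = 1 then (some "R", candidate_dir)
        else if i = 2 then (some "U", candidate_dir)
        else (some "L", candidate_dir)
      else pvLoopA current_dir target_vec dirIdx rest

def get_turn_action (current_dir : String) (target_vec : Int × Int) : Option String × String :=
  match PySem.List.index? pvDirections current_dir with
  | none => (none, current_dir)  -- A raises ValueError here; excluded by Pre_
  | some dir_idx => pvLoopA current_dir target_vec dir_idx (PySem.List.pyRange 0 4 1)

-- ===== PORT B =====
def pvVecToDir : PySem.Dict (Int × Int) String :=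
  PySem.Dict.ofList [((-1, 0), "N"), ((0, 1), "E"), ((1, 0), "S"), ((0, -1), "W")]

def pvTurns : List String := ["F", "R", "U", "L"]

def get_turn_action_alt (current_dir : String) (target_vec : Int × Int) : Option String × String :=
  match PySem.List.index? pvDirections current_dir with
  | none => (none, current_dir)  -- B raises ValueError here; excluded by Pre_
  | some dir_idx =>
    match pvVecToDir.get? target_vec with
    | none => (none, current_dir)
    | some target_dir =>
      match PySem.List.index? pvDirections target_dir with
      | none => (none, current_dir)  -- unreachable: target_dir is a key of pvDirVectors
      | some tIdx =>
        match PySem.List.pyGet? pvTurns (PySem.Int.mod (tIdx - dir_idx) 4) with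
        | none => (none, current_dir)  -- unreachable: index is in [0,3]
        | some act => (some act, target_dir)

-- ===== PRECONDITION & SPEC =====
-- Pre_ excludes exactly the inputs where A (and B) raise ValueError: current_dir not a compass direction.
def Pre_get_turn_action (current_dir : String) (_target_vec : Int × Int) : Prop :=
  current_dir = "N" ∨ current_dir = "E" ∨ current_dir = "S" ∨ current_dir = "W"
instance (current_dir : String) (target_vec : Int × Int) : Decidable (Pre_get_turn_action current_dir target_vec) := by unfold Pre_get_turn_action; infer_instance

def pvWitness_get_turn_action : String × (Int × Int) := ("E", (1, 0))

def Spec_get_turn_action (current_dir : String) (target_vec : Int × Int) (out : Option String × String) : Prop := out = get_turn_action_alt current_dir target_vec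
instance (current_dir : String) (target_vec : Int × Int) (out : Option String × String) : Decidable (Spec_get_turn_action current_dir target_vec out) := by unfold Spec_get_turn_action; infer_instance

-- ===== CLAIM (what is proved, stated in full; the proofs are below) =====
def Claim_equal_get_turn_action : Prop := ∀ (current_dir : String) (target_vec : Int × Int), Dom_get_turn_action current_dir target_vec → Pre_get_turn_action current_dir target_vec → Spec_get_turn_action current_dir target_vec (get_turn_action current_dir target_vec)

-- ===== LEMMAS AND PROOFS =====

-- with current_dir fixed, both programs are piecewise in which of the four vectors target_vec equals
lemma pv_case (cd : String) (hcd : cd = "N" ∨ cd = "E" ∨ cd = "S" ∨ cd = "W")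
    (tv : Int × Int) : get_turn_action cd tv = get_turn_action_alt cd tv := by
  obtain ⟨a, b⟩ := tv
  by_cases h1 : a = -1 ∧ b = 0
  · obtain ⟨rfl, rfl⟩ := h1; rcases hcd with rfl | rfl | rfl | rfl <;> decide
  by_cases h2 : a = 0 ∧ b = 1
  · obtain ⟨rfl, rfl⟩ := h2; rcases hcd with rfl | rfl | rfl | rfl <;> decide
  by_cases h3 : a = 1 ∧ b = 0
  · obtain ⟨rfl, rfl⟩ := h3; rcases hcd with rfl | rfl | rfl | rfl <;> decide
  by_cases h4 : a = 0 ∧ b = -1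
  · obtain ⟨rfl, rfl⟩ := h4; rcases hcd with rfl | rfl | rfl | rfl <;> decide
  -- target_vec matches no compass vector: both return (none, cd)
  have e1 : ((((-1 : Int), (0 : Int)) : Int × Int) == (a, b)) = false := by
    simp [Prod.ext_iff]; omega
  have e2 : ((((0 : Int), (1 : Int)) : Int × Int) == (a, b)) = false := by
    simp [Prod.ext_iff]; omega
  have e3 : ((((1 : Int), (0 : Int)) : Int × Int) == (a, b)) = false := by
    simp [Prod.ext_iff]; omega
  have e4 : ((((0 : Int), (-1 : Int)) : Int × Int) == (a, b)) = false := by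
    simp [Prod.ext_iff]; omega
  rcases hcd with rfl | rfl | rfl | rfl <;>
    simp [get_turn_action, get_turn_action_alt, pvLoopA, pvDirections, pvDirVectors,
      pvVecToDir, PySem.List.index?, PySem.Dict.get?, PySem.Dict.ofList,
      PySem.List.pyRange, PySem.List.pyGet?, PySem.Int.mod, List.idxOf?, List.findIdx?,
      List.findIdx?.go, List.range, List.range.loop, PySem.List.pyIdx?, PySem.Dict.update,
      PySem.Dict.empty, List.find?, Option.bind, PySem.Dict.insert,
      PySem.Dict.contains, e1, e2, e3, e4, Prod.ext_iff] <;>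
    split_ifs <;> first | exact ⟨rfl, rfl⟩ | omega

-- ===== VERDICT (by name: the statement is the Claim_ definition above) =====
theorem get_turn_action_spec : Claim_equal_get_turn_action := by
  intro cd tv _ hpre
  exact pv_case cd hpre tv
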